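-- pv_equiv track=rewrite | github.com/OnkarDeshpande/DS-Algo-Python | dp_assignment.py | partitions_count
-- ===== SOURCE A (Python) =====
-- def partitions_count(var_num):
--
--     memo_dict ={}
--
--     if var_num in memo_dict:
--         return memo_dict[var_num]
--
--     if var_num<=2:
--         memo_dict[1] = 1
--         memo_dict[2] = 1
--         return memo_dict[var_num]
--     elif var_num == 3:
--         temp =  1 + partitions_count(var_num-1)
--     elif var_num == 4:
--         temp =  1 + partitions_count(var_num-1) + partitions_count(var_num-3)
--     else:
--         temp =  partitions_count(var_num-1)
--         temp += partitions_count(var_num-3)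
--         temp += partitions_count(var_num-4)
--
--     memo_dict[var_num] = temp
--     return memo_dict[var_num]
-- ===== SOURCE B (Python) =====
-- def partitions_count(var_num):
--     # Bottom-up: f(1)=f(2)=1, f(3)=2, and f(n)=f(n-1)+f(n-3)+f(n-4) with f(0):=1,
--     # carrying a sliding window of the last four values.
--     if var_num <= 2:
--         return 1
--     a, b, c, d = 1, 1, 1, 2
--     for _ in range(3, var_num):
--         a, b, c, d = b, c, d, d + b + a
--     return d
-- ===== Notes on version B (the rewrite author's own statement) =====
-- stated objective: faster
-- what changed: Replaced the exponential top-down recursion (the memo dict is recreated empty on every call, so the memoisation never works) with a bottom-up O(n) sliding-window iteration of the recurrence f(n)=f(n-1)+f(n-3)+f(n-4).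
import Mathlib
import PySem

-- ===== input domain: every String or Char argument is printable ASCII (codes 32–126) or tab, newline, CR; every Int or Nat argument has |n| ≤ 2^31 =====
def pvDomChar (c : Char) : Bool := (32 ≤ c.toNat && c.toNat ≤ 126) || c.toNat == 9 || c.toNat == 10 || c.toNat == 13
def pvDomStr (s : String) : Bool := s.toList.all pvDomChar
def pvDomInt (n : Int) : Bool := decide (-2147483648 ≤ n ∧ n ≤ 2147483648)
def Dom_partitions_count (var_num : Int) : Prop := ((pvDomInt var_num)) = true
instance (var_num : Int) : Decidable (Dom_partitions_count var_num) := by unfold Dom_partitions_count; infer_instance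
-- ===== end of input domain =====

-- B replaces A's exponential recursion (A's memo dict is recreated empty each call) with a
-- bottom-up O(n) sliding-window iteration; equivalence of return values proved for var_num ≥ 1.

-- ===== PORT A =====
-- memo_dict = {} is fresh on every call, so the opening 'if var_num in memo_dict' is always
-- false and is omitted; for var_num ≤ 2 Python returns memo_dict[var_num], a KeyError unless
-- var_num ∈ {1, 2} — those raising inputs are excluded by Pre_ (the port yields getD 0 there).
def partitions_count (var_num : Int) : Int :=
  if var_num ≤ 2 then
    (((PySem.Dict.empty : PySem.Dict Int Int).insert 1 1).insert 2 1).get? var_num |>.getD 0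
  else if var_num = 3 then 1 + partitions_count (var_num - 1)
  else if var_num = 4 then 1 + partitions_count (var_num - 1) + partitions_count (var_num - 3)
  else partitions_count (var_num - 1) + partitions_count (var_num - 3) + partitions_count (var_num - 4)
termination_by var_num.toNat
decreasing_by all_goals omega

-- ===== PORT B =====
def partitions_count_alt (var_num : Int) : Int :=
  if var_num ≤ 2 then 1
  else
    ((PySem.List.pyRange 3 var_num 1).foldl
      (fun (s : Int × Int × Int × Int) _ =>
        (s.2.1, s.2.2.1, s.2.2.2, s.2.2.2 + s.2.1 + s.1))
      (1, 1, 1, 2)).2.2.2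

-- ===== PRECONDITION & SPEC =====
-- Pre_ excludes exactly var_num ≤ 0, where Python A raises KeyError (fresh memo only has keys 1, 2).
def Pre_partitions_count (var_num : Int) : Prop := 1 ≤ var_num
instance (var_num : Int) : Decidable (Pre_partitions_count var_num) := by unfold Pre_partitions_count; infer_instance
def pvWitness_partitions_count : Int := 7

def Spec_partitions_count (var_num : Int) (out : Int) : Prop := out = partitions_count_alt var_num
instance (var_num : Int) (out : Int) : Decidable (Spec_partitions_count var_num out) := by unfold Spec_partitions_count; infer_instance

-- ===== CLAIM (what is proved, stated in full; the proofs are below) =====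
def Claim_equal_partitions_count : Prop := ∀ (var_num : Int), Dom_partitions_count var_num → Pre_partitions_count var_num → Spec_partitions_count var_num (partitions_count var_num)

-- ===== LEMMAS AND PROOFS =====

-- the reference sequence: F 0 = 1 (fictitious), F 1 = F 2 = 1, F 3 = 2, F (n+4) = F (n+3) + F (n+1) + F n
def pvF : Nat → Int
  | 0 => 1
  | 1 => 1
  | 2 => 1
  | 3 => 2
  | n + 4 => pvF (n + 3) + pvF (n + 1) + pvF n

theorem pvA1 : partitions_count 1 = 1 := by rw [partitions_count]; decide
theorem pvA2 : partitions_count 2 = 1 := by rw [partitions_count]; decide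
theorem pvA3 : partitions_count 3 = 2 := by rw [partitions_count]; norm_num [pvA2]
theorem pvA4 : partitions_count 4 = 4 := by rw [partitions_count]; norm_num [pvA3, pvA1]

theorem pvA_eq_F : ∀ (n : Nat), 1 ≤ n → partitions_count (n : Int) = pvF n := by
  intro n
  induction n using Nat.strong_induction_on with
  | _ n ih =>
    intro h1
    match n with
    | 1 => rw [show ((1:Nat):Int) = 1 by norm_num, pvA1]; decide
    | 2 => rw [show ((2:Nat):Int) = 2 by norm_num, pvA2]; decide
    | 3 => rw [show ((3:Nat):Int) = 3 by norm_num, pvA3]; decide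
    | 4 => rw [show ((4:Nat):Int) = 4 by norm_num, pvA4]; decide
    | (m + 5) =>
      have e1 : ((m + 5 : Nat) : Int) - 1 = ((m + 4 : Nat) : Int) := by push_cast; ring
      have e3 : ((m + 5 : Nat) : Int) - 3 = ((m + 2 : Nat) : Int) := by push_cast; ring
      have e4 : ((m + 5 : Nat) : Int) - 4 = ((m + 1 : Nat) : Int) := by push_cast; ring
      rw [partitions_count]
      have hle : ¬ ((m + 5 : Nat) : Int) ≤ 2 := by push_cast; omega
      have h3 : ¬ ((m + 5 : Nat) : Int) = 3 := by push_cast; omega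
      have h4 : ¬ ((m + 5 : Nat) : Int) = 4 := by push_cast; omega
      rw [if_neg hle, if_neg h3, if_neg h4, e1, e3, e4,
        ih (m + 4) (by omega) (by omega), ih (m + 2) (by omega) (by omega),
        ih (m + 1) (by omega) (by omega)]
      show pvF (m + 4) + pvF (m + 2) + pvF (m + 1) = pvF (m + 5)
      have : pvF (m + 5) = pvF (m + 4) + pvF (m + 2) + pvF (m + 1) := by
        rw [pvF]
      omega

-- B's fold over range(3, n) lands on the window (F (n-3), F (n-2), F (n-1), F n)
theorem pvB_fold (n : Nat) (h : 3 ≤ n) :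
    ((PySem.List.pyRange 3 (n : Int) 1).foldl
      (fun (s : Int × Int × Int × Int) _ =>
        (s.2.1, s.2.2.1, s.2.2.2, s.2.2.2 + s.2.1 + s.1))
      (1, 1, 1, 2)) = (pvF (n - 3), pvF (n - 2), pvF (n - 1), pvF n) := by
  induction n with
  | zero => omega
  | succ m ih =>
    by_cases hm : 3 ≤ m
    · have hcast : ((m + 1 : Nat) : Int) = (m : Int) + 1 := by push_cast; ring
      rw [hcast, PySem.List.pyRange_one_succ_right (by exact_mod_cast hm),
        List.foldl_append, ih hm]
      simp only [List.foldl_cons, List.foldl_nil]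
      have h4 : ∃ k, m = k + 3 := ⟨m - 3, by omega⟩
      obtain ⟨k, rfl⟩ := h4
      have hr : pvF (k + 4) = pvF (k + 3) + pvF (k + 1) + pvF k := by rw [pvF]
      simp only [Nat.add_sub_cancel, show k + 3 - 2 = k + 1 by omega,
        show k + 3 - 1 = k + 2 by omega, show k + 3 + 1 - 3 = k + 1 by omega, show k + 3 + 1 - 2 = k + 2 by omega,
        show k + 3 + 1 - 1 = k + 3 by omega, show k + 3 + 1 = k + 4 by omega, hr]
    · have hm2 : m = 2 := by omega
      subst hm2
      decide

theorem pvB_eq_F (n : Nat) (h : 1 ≤ n) : partitions_count_alt (n : Int) = pvF n := by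
  by_cases h2 : n ≤ 2
  · match n, h, h2 with
    | 1, _, _ => decide
    | 2, _, _ => decide
  · rw [partitions_count_alt, if_neg (by omega), pvB_fold n (by omega)]

-- ===== VERDICT (by name: the statement is the Claim_ definition above) =====
theorem partitions_count_spec : Claim_equal_partitions_count := by
  intro var_num _ hpre
  have hp : 1 ≤ var_num := hpre
  have hn : ∃ n : Nat, var_num = (n : Int) ∧ 1 ≤ n := ⟨var_num.toNat, by omega, by omega⟩
  obtain ⟨n, rfl, h1⟩ := hn
  show partitions_count (n : Int) = partitions_count_alt (n : Int)
  rw [pvA_eq_F n h1, pvB_eq_F n h1]
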